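-- pv_equiv track=rewrite | github.com/sandialabs/conin | clio/common_constraints.py | appears_at_least_once_before
-- ===== SOURCE A (Python) =====
-- def appears_at_least_once_before(seq, val1, val2):
--     """
--     Requires at least one instance of val1 to appear before first val2
--
--     Parameters:
--         seq (iterable): The sequence to be checked.
--         val1: val1 appears before val2
--         val2: val2 appears after val1
--
--     Returns:
--         bool: True iff satisfied
--     """
--     for index1, x1 in enumerate(seq):
--         if x1 == val2:
--             for index2 in range(0, index1):
--                 if seq[index2] == val1:
--                     return True
--             return False
--     return True
-- ===== SOURCE B (Python) =====
-- def appears_at_least_once_before(seq, val1, val2):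
--     """Single pass: track whether val1 has been seen; decide at the first val2."""
--     seen_val1 = False
--     for x in seq:
--         if x == val2:
--             return seen_val1
--         if x == val1:
--             seen_val1 = True
--     return True
-- ===== Notes on version B (the rewrite author's own statement) =====
-- stated objective: simpler
-- what changed: Replaced A's outer scan plus nested prefix rescan at the first val2 with one linear pass maintaining a seen_val1 flag, deciding immediately at the first val2.
import Mathlib
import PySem

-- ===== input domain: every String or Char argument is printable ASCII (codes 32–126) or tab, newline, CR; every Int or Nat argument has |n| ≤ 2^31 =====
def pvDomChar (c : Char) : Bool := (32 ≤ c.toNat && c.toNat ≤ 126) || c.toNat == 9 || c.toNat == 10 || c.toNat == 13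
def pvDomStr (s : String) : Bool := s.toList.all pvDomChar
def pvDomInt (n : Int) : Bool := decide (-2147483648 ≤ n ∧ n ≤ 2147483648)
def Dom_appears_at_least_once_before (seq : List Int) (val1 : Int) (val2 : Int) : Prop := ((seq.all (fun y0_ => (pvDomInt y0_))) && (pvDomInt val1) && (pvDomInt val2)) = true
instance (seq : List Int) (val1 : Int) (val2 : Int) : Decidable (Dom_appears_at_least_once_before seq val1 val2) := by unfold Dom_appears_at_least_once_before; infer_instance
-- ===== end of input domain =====

-- B replaces A's outer scan with nested prefix rescan by one linear pass keeping a seen-flag (simpler).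


-- ===== PORT A =====
-- inner loop: 'for index2 in range(0, index1): if seq[index2] == val1: return True / return False'
def pvInnerA (seq : List Int) (val1 : Int) (i stop : Nat) : Bool :=
  if i < stop then
    match PySem.List.pyGet? seq (i : Int) with
    | some v => if v = val1 then true else pvInnerA seq val1 (i + 1) stop
    | none => false   -- unreachable: i < stop ≤ len(seq) at every call
  else false
termination_by stop - i

-- outer loop: 'for index1, x1 in enumerate(seq): if x1 == val2: <inner loop>' then 'return True'
def pvOuterA (seq : List Int) (val1 val2 : Int) : List Int → Nat → Bool
  | [], _ => true
  | x :: xs, idx => if x = val2 then pvInnerA seq val1 0 idx else pvOuterA seq val1 val2 xs (idx + 1)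

def appears_at_least_once_before (seq : List Int) (val1 : Int) (val2 : Int) : Bool :=
  pvOuterA seq val1 val2 seq 0

-- ===== PORT B =====
def pvAltGo (val1 val2 : Int) : List Int → Bool → Bool
  | [], _ => true
  | x :: xs, seen => if x = val2 then seen else pvAltGo val1 val2 xs (seen || decide (x = val1))

def appears_at_least_once_before_alt (seq : List Int) (val1 : Int) (val2 : Int) : Bool :=
  pvAltGo val1 val2 seq false

-- ===== PRECONDITION & SPEC =====
def Spec_appears_at_least_once_before (seq : List Int) (val1 : Int) (val2 : Int) (out : Bool) : Prop := out = appears_at_least_once_before_alt seq val1 val2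
instance (seq : List Int) (val1 : Int) (val2 : Int) (out : Bool) : Decidable (Spec_appears_at_least_once_before seq val1 val2 out) := by unfold Spec_appears_at_least_once_before; infer_instance

-- ===== CLAIM (what is proved, stated in full; the proofs are below) =====
def Claim_equal_appears_at_least_once_before : Prop := ∀ (seq : List Int) (val1 : Int) (val2 : Int), Dom_appears_at_least_once_before seq val1 val2 → Spec_appears_at_least_once_before seq val1 val2 (appears_at_least_once_before seq val1 val2)

-- ===== LEMMAS AND PROOFS =====

-- shifting the scanned list by one shifts the index window by one
theorem pvInnerA_shift (s : List Int) (v x : Int) :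
    ∀ d i stop, stop - i = d → pvInnerA (x :: s) v (i + 1) (stop + 1) = pvInnerA s v i stop := by
  intro d
  induction d with
  | zero =>
    intro i stop h
    have hn : ¬ i < stop := by omega
    conv_lhs => rw [pvInnerA]
    conv_rhs => rw [pvInnerA]
    simp [hn]
  | succ n ih =>
    intro i stop h
    have hlt : i < stop := by omega
    conv_lhs => rw [pvInnerA]
    conv_rhs => rw [pvInnerA]
    have hget : PySem.List.pyGet? (x :: s) ((i + 1 : Nat) : Int) = PySem.List.pyGet? s ((i : Nat) : Int) := by
      rw [PySem.List.pyGet?_natCast, PySem.List.pyGet?_natCast]; simp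
    simp only [hget, hlt, Nat.add_lt_add_iff_right, if_pos]
    cases hg : PySem.List.pyGet? s ((i : Nat) : Int) with
    | none => rfl
    | some w =>
      by_cases hw : w = v
      · simp [hw]
      · simp only [hw, if_false]
        exact ih (i + 1) stop (by omega)

-- the inner rescan of the prefix computes exactly 'val1 seen in the prefix'
theorem pvInnerA_prefix (v : Int) :
    ∀ (pre rest : List Int), pvInnerA (pre ++ rest) v 0 pre.length = pre.any (fun y => decide (y = v)) := by
  intro pre
  induction pre with
  | nil =>
    intro rest
    rw [pvInnerA]; simp
  | cons p ps ih =>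
    intro rest
    rw [pvInnerA]
    simp only [List.length_cons, List.cons_append]
    have h0 : PySem.List.pyGet? (p :: (ps ++ rest)) ((0 : Nat) : Int) = some p := by
      rw [PySem.List.pyGet?_natCast]; rfl
    simp only [Nat.succ_pos, if_pos, h0]
    by_cases hp : p = v
    · simp [hp]
    · simp only [hp, if_false]
      have := pvInnerA_shift (ps ++ rest) v p (ps.length - 0) 0 ps.length rfl
      simp only [Nat.zero_add] at this
      rw [this, ih rest]
      simp [hp]

-- loop invariant: A's outer state (suffix, index) matches B's (suffix, flag)
theorem pvOuter_eq_alt (v1 v2 : Int) :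
    ∀ (rest pre : List Int),
      pvOuterA (pre ++ rest) v1 v2 rest pre.length = pvAltGo v1 v2 rest (pre.any (fun y => decide (y = v1))) := by
  intro rest
  induction rest with
  | nil => intro pre; rfl
  | cons x xs ih =>
    intro pre
    rw [pvOuterA, pvAltGo]
    by_cases hx : x = v2
    · simp only [hx, if_pos]
      exact pvInnerA_prefix v1 pre (v2 :: xs)
    · simp only [hx, if_false]
      have hify := ih (pre ++ [x])
      simp only [List.append_assoc, List.cons_append, List.nil_append,
        List.length_append, List.length_cons, List.length_nil] at hify
      rw [hify]
      simp [List.any_append]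

-- ===== VERDICT (by name: the statement is the Claim_ definition above) =====
theorem appears_at_least_once_before_spec : Claim_equal_appears_at_least_once_before := by
  intro seq val1 val2 _
  unfold Spec_appears_at_least_once_before appears_at_least_once_before appears_at_least_once_before_alt
  have := pvOuter_eq_alt val1 val2 seq []
  simpa using this
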